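-- pv_equiv track=rewrite | github.com/mingjerli/clgraph | src/clgraph/query_parser.py | _expand_cube
-- ===== SOURCE A (Python) =====
-- from typing import Any, Dict, List, Optional, Tuple, Union
--
-- def _expand_cube(columns: List[str]) -> List[List[str]]:
--     """Expand CUBE into all 2^n combinations."""
--     from itertools import combinations
--
--     result = []
--     n = len(columns)
--     # Generate all subsets from full set to empty set
--     for r in range(n, -1, -1):
--         for combo in combinations(columns, r):
--             result.append(list(combo))
--     return result
-- ===== SOURCE B (Python) =====
-- def _expand_cube(columns):
--     """Expand CUBE into all 2^n combinations via a Pascal-triangle style DP: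
--     groups[r] holds the size-r combinations; each column merges adjacent groups."""
--     def step(x, groups):
--         prev = groups[0]
--         new = [[[]]]
--         for g in groups[1:]:
--             new.append([[x] + c for c in prev] + g)
--             prev = g
--         new.append([[x] + c for c in prev])
--         return new
--
--     groups = [[[]]]
--     for x in reversed(columns):
--         groups = step(x, groups)
--     return [combo for grp in reversed(groups) for combo in grp]
-- ===== Notes on version B (the rewrite author's own statement) =====
-- stated objective: alternative
-- what changed: Replaces the per-size itertools.combinations loop by a single Pascal-triangle style pass: size-groups of combinations are built incrementally by merging adjacent groups once per column, then flattened from full set down to the empty set.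
import Mathlib
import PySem

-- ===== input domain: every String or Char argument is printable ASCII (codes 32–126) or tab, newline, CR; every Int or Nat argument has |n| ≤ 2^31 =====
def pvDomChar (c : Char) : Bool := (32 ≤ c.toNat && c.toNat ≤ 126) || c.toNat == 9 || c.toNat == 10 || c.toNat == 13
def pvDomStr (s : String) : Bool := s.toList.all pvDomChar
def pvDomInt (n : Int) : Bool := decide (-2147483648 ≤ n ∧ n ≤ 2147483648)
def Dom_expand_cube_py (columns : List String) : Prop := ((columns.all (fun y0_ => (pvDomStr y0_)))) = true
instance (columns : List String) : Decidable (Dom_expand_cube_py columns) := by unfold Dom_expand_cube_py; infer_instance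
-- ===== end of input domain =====

-- B replaces A's per-size itertools.combinations loop by a single Pascal-triangle style
-- pass that merges adjacent size-groups once per column (objective: alternative).

-- ===== PORT A =====
-- for r in range(n, -1, -1): for combo in combinations(columns, r): result.append(list(combo))
def expand_cube_py (columns : List String) : List (List String) :=
  let n : Int := columns.length
  (PySem.List.pyRange n (-1) (-1)).foldl
    (fun result r =>
      (PySem.List.combinations columns r.toNat).foldl
        (fun res combo => res ++ [combo]) result)
    []

-- ===== PORT B =====
-- step(x, groups): prev = groups[0]; new = [[[]]]; for g in groups[1:]: new.append([[x]+c for c in prev] + g); prev = g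
--                  new.append([[x]+c for c in prev]); return new
def pvStep (x : String) (groups : List (List (List String))) : List (List (List String)) :=
  match groups with
  | [] => [[[]]]  -- unreachable: B's groups list is never empty
  | prev :: rest =>
    let st := rest.foldl
      (fun (st : List (List String) × List (List (List String))) g =>
        (g, st.2 ++ [st.1.map (fun c => x :: c) ++ g]))
      (prev, [[[]]])
    st.2 ++ [st.1.map (fun c => x :: c)]

-- groups = [[[]]]; for x in reversed(columns): groups = step(x, groups); return [combo for grp in reversed(groups) for combo in grp]
def expand_cube_py_alt (columns : List String) : List (List String) :=
  let groups := columns.reverse.foldl (fun gs x => pvStep x gs) [[[]]]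
  groups.reverse.flatMap (fun grp => grp)

-- ===== PRECONDITION & SPEC =====
def Spec_expand_cube_py (columns : List String) (out : List (List String)) : Prop := out = expand_cube_py_alt columns
instance (columns : List String) (out : List (List String)) : Decidable (Spec_expand_cube_py columns out) := by unfold Spec_expand_cube_py; infer_instance

-- ===== CLAIM (what is proved, stated in full; the proofs are below) =====
def Claim_equal_expand_cube_py : Prop := ∀ (columns : List String), Dom_expand_cube_py columns → Spec_expand_cube_py columns (expand_cube_py columns)

-- ===== LEMMAS AND PROOFS =====

-- the merge fold inside pvStep, characterised: it carries the last group and appends the pairwise merges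
theorem pv_merge_foldl (x : String) :
    ∀ (gs : List (List (List String))) (prev : List (List String)) (acc : List (List (List String))),
    gs.foldl (fun st g => (g, st.2 ++ [st.1.map (fun c => x :: c) ++ g])) (prev, acc)
    = ((prev :: gs).getLastD [],
       acc ++ ((prev :: gs).zip gs).map (fun pg => pg.1.map (fun c => x :: c) ++ pg.2)) := by
  intro gs
  induction gs with
  | nil => intro prev acc; simp
  | cons g gs ih =>
    intro prev acc
    simp only [List.foldl_cons, ih g (acc ++ [prev.map (fun c => x :: c) ++ g])]
    simp [List.zip]

theorem pv_zip_range_map {α : Type} (m : Nat) (C : Nat → α) :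
    (((List.range (m+1)).map C).zip ((List.range m).map (fun i => C (i+1))))
    = (List.range m).map (fun i => (C i, C (i+1))) := by
  induction m generalizing C with
  | zero => simp
  | succ m ih =>
    have h1 : (List.range (m+1+1)).map C = C 0 :: (List.range (m+1)).map (fun i => C (i+1)) := by
      rw [List.range_succ_eq_map]; simp [Function.comp_def]
    have h2 : (List.range (m+1)).map (fun i => C (i+1)) = C 1 :: (List.range m).map (fun i => C (i+2)) := by
      rw [List.range_succ_eq_map]; simp [Function.comp_def]
    have h3 : (List.range (m+1)).map (fun i => (C i, C (i+1))) = (C 0, C 1) :: (List.range m).map (fun i => (C (i+1), C (i+2))) := by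
      rw [List.range_succ_eq_map]; simp [Function.comp_def]
    calc ((List.range (m+1+1)).map C).zip ((List.range (m+1)).map (fun i => C (i+1)))
        = (C 0 :: (C 1 :: (List.range m).map (fun i => C (i+2)))).zip
            (C 1 :: (List.range m).map (fun i => C (i+2))) := by rw [h1, h2]
      _ = (C 0, C 1) :: (C 1 :: (List.range m).map (fun i => C (i+2))).zip
            ((List.range m).map (fun i => C (i+2))) := by rw [List.zip_cons_cons]
      _ = (C 0, C 1) :: ((List.range (m+1)).map (fun i => C (i+1))).zip
            ((List.range m).map (fun i => C (i+2))) := by rw [h2]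
      _ = (C 0, C 1) :: (List.range m).map (fun i => (C (i+1), C (i+2))) := by
            rw [ih (fun i => C (i+1))]
      _ = (List.range (m+1)).map (fun i => (C i, C (i+1))) := h3.symm

-- one merge pass turns the size-groups of l into the size-groups of x :: l
theorem pv_step_spec (x : String) (l : List String) :
    pvStep x ((List.range (l.length+1)).map (fun r => PySem.List.combinations l r))
    = (List.range (l.length+2)).map (fun r => PySem.List.combinations (x :: l) r) := by
  have hhead : (List.range (l.length+1)).map (fun r => PySem.List.combinations l r)
      = PySem.List.combinations l 0 :: (List.range l.length).map (fun i => PySem.List.combinations l (i+1)) := by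
    rw [List.range_succ_eq_map]; simp [Function.comp_def]
  have hlast : ((List.range (l.length+1)).map (fun r => PySem.List.combinations l r)).getLastD []
      = PySem.List.combinations l l.length := by
    simp [List.range_succ]
  have hr : (List.range (l.length+2)).map (fun r => PySem.List.combinations (x::l) r)
      = PySem.List.combinations (x::l) 0 ::
        ((List.range l.length).map (fun i => PySem.List.combinations (x::l) (i+1))
          ++ [PySem.List.combinations (x::l) (l.length+1)]) := by
    rw [show l.length+2 = (l.length+1)+1 from rfl, List.range_succ_eq_map, List.range_succ]
    simp [Function.comp_def]
  rw [hhead]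
  simp only [pvStep]
  rw [pv_merge_foldl, ← hhead, pv_zip_range_map l.length (fun r => PySem.List.combinations l r), hlast, hr]
  have hz : PySem.List.combinations l (l.length+1) = [] :=
    PySem.List.combinations_eq_nil_of_length_lt _ (by omega)
  simp [PySem.List.combinations_zero, PySem.List.combinations_cons_succ, hz]

-- B's accumulated groups are exactly the combinations, size by size
theorem pv_groups_spec (l : List String) :
    l.foldr (fun x gs => pvStep x gs) [[[]]]
    = (List.range (l.length+1)).map (fun r => PySem.List.combinations l r) := by
  induction l with
  | nil => simp [PySem.List.combinations_zero]
  | cons x l ih =>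
    simp only [List.foldr_cons, ih, pv_step_spec, List.length_cons]

theorem pv_rev_flatMap (m : Nat) (C : Nat → List (List String)) :
    (((List.range (m+1)).map C).reverse).flatMap (fun g => g)
    = (List.range (m+1)).flatMap (fun k => C (m - k)) := by
  induction m generalizing C with
  | zero => simp
  | succ m ih =>
    have hL : (List.range (m+2)).map C = ((List.range (m+1)).map C) ++ [C (m+1)] := by
      rw [List.range_succ]; simp
    have hfun : (fun k => C (m+1 - (k+1))) = (fun k => C (m-k)) := by
      funext k; congr 1; omega
    have hR : (List.range (m+2)).flatMap (fun k => C (m+1-k))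
        = C (m+1) ++ (List.range (m+1)).flatMap (fun k => C (m-k)) := by
      rw [show m+2 = (m+1)+1 from rfl, List.range_succ_eq_map]
      rw [List.flatMap_cons, List.flatMap_map]
      simp only [Nat.sub_zero, hfun]
    rw [show m+1+1 = m+2 from rfl, hL, List.reverse_append, hR, ← ih C]
    simp

-- ===== VERDICT (by name: the statement is the Claim_ definition above) =====
theorem expand_cube_py_spec : Claim_equal_expand_cube_py := by
  intro columns _
  unfold Spec_expand_cube_py expand_cube_py expand_cube_py_alt
  simp only [PySem.List.foldl_append_singleton_eq_self]
  rw [PySem.List.foldl_append_eq_flatMap, List.foldl_reverse, List.nil_append]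
  have hg : columns.foldr (fun x gs => pvStep x gs) [[[]]]
      = (List.range (columns.length+1)).map (fun r => PySem.List.combinations columns r) :=
    pv_groups_spec columns
  rw [hg, pv_rev_flatMap, PySem.List.pyRange_neg_one]
  have h1 : ((columns.length : Int) - (-1)).toNat = columns.length + 1 := by omega
  rw [h1, List.flatMap_map]
  apply List.flatMap_congr
  intro k hk
  have hk' : k < columns.length + 1 := List.mem_range.mp hk
  congr 1
  omega
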